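-- pv_equiv track=rewrite | github.com/firecracker-microvm/firecracker | tools/ab_test.py | uninteresting_dimensions
-- ===== SOURCE A (Python) =====
-- from collections import defaultdict
--
-- def uninteresting_dimensions(data):
--     """
--     Computes the set of dimensions that only ever take on a
--     single value across the entire dataset.
--     """
--     values_per_dimension = defaultdict(set)
--
--     for dimension_set in data:
--         for dimension, value in dimension_set:
--             values_per_dimension[dimension].add(value)
--
--     uninteresting = set()
--
--     for dimension, distinct_values in values_per_dimension.items():
--         if len(distinct_values) == 1:
--             uninteresting.add(dimension)
--
--     return uninteresting
-- ===== SOURCE B (Python) =====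
-- def uninteresting_dimensions(data):
--     """
--     Computes the set of dimensions that only ever take on a
--     single value across the entire dataset.
--     """
--     first_value = {}
--     disqualified = set()
--     for dimension_set in data:
--         for dimension, value in dimension_set:
--             if dimension not in first_value:
--                 first_value[dimension] = value
--             elif first_value[dimension] != value:
--                 disqualified.add(dimension)
--     return set(first_value) - disqualified
-- ===== Notes on version B (the rewrite author's own statement) =====
-- stated objective: simpler
-- what changed: Instead of accumulating a per-dimension set of all distinct values and then filtering dimensions whose set has size 1, B keeps only the first value seen per dimension and a 'disqualified' set, disqualifying a dimension inline as soon as a second distinct value appears; the per-dimension value sets and the final len==1 filtering pass disappear.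
import Mathlib
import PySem

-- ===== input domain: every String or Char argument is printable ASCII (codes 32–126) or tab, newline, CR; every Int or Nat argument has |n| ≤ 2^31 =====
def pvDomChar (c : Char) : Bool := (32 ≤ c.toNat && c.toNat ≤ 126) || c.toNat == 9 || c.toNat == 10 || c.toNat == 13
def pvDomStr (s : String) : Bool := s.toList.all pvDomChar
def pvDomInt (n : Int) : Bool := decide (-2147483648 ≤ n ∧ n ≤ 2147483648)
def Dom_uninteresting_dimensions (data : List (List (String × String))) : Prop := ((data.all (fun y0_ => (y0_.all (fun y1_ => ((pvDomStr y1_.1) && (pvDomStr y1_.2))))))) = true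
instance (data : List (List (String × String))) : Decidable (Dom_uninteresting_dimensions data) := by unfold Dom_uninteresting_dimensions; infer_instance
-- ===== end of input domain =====

-- B replaces A's per-dimension sets of all distinct values (plus a final len==1 filtering
-- pass) by a single pass keeping only the first value per dimension and a set of
-- dimensions disqualified as soon as a second distinct value appears (objective: simpler).
-- The returned Python value is a set: the List String results are equal as lists here
-- because both ports enumerate dimensions in first-occurrence order.

-- ===== PORT A =====
def uninteresting_dimensions (data : List (List (String × String))) : List String :=
  let values_per_dimension : PySem.Dict String (PySem.Set String) :=
    data.foldl (fun d dimension_set =>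
      dimension_set.foldl
        (fun d p => d.modify p.1 [] (fun s => PySem.Set.add s p.2)) d)
      PySem.Dict.empty
  values_per_dimension.items.foldl
    (fun u p => if PySem.Set.len p.2 == 1 then PySem.Set.add u p.1 else u)
    PySem.Set.empty

-- ===== PORT B =====
def uninteresting_dimensions_alt (data : List (List (String × String))) : List String :=
  let st : PySem.Dict String String × PySem.Set String :=
    data.foldl (fun st dimension_set =>
      dimension_set.foldl
        (fun st p =>
          if st.1.contains p.1 = false then (st.1.insert p.1 p.2, st.2)
          else if st.1.getD p.1 "" ≠ p.2 then (st.1, PySem.Set.add st.2 p.1)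
          else st) st)
      (PySem.Dict.empty, PySem.Set.empty)
  PySem.Set.diff (PySem.Set.ofList st.1.keys) st.2

-- ===== PRECONDITION & SPEC =====
def Spec_uninteresting_dimensions (data : List (List (String × String))) (out : List String) : Prop := out = uninteresting_dimensions_alt data
instance (data : List (List (String × String))) (out : List String) : Decidable (Spec_uninteresting_dimensions data out) := by unfold Spec_uninteresting_dimensions; infer_instance

-- ===== CLAIM (what is proved, stated in full; the proofs are below) =====
def Claim_equal_uninteresting_dimensions : Prop := ∀ (data : List (List (String × String))), Dom_uninteresting_dimensions data → Spec_uninteresting_dimensions data (uninteresting_dimensions data)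

-- ===== LEMMAS AND PROOFS =====

-- The invariant relating A's value-set dict to B's (first-value dict, disqualified set):
-- same keys in the same order, and for every recorded dimension, its value set is
-- exactly the singleton of its first value unless the dimension is disqualified, in
-- which case the value set has at least two elements.
def InvUD (d : PySem.Dict String (PySem.Set String))
    (fv : PySem.Dict String String) (dq : PySem.Set String) : Prop :=
  d.keys = fv.keys ∧ fv.keys.Nodup ∧
  (∀ k, k ∈ dq → k ∈ fv.keys) ∧
  (∀ k v0, fv.get? k = some v0 → ∃ s : PySem.Set String, d.get? k = some s ∧
      (if k ∈ dq then 2 ≤ s.length else s = [v0]))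

lemma stepA_eq (d : PySem.Dict String (PySem.Set String)) (p : String × String) :
    d.modify p.1 [] (fun s => PySem.Set.add s p.2)
      = d.insert p.1 (PySem.Set.add (d.getD p.1 []) p.2) := rfl

lemma step_inv (p : String × String) (d : PySem.Dict String (PySem.Set String))
    (fv : PySem.Dict String String) (dq : PySem.Set String) (h : InvUD d fv dq) :
    InvUD (d.modify p.1 [] (fun s => PySem.Set.add s p.2))
      (if fv.contains p.1 = false then (fv.insert p.1 p.2, dq)
       else if fv.getD p.1 "" ≠ p.2 then (fv, PySem.Set.add dq p.1)
       else (fv, dq)).1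
      (if fv.contains p.1 = false then (fv.insert p.1 p.2, dq)
       else if fv.getD p.1 "" ≠ p.2 then (fv, PySem.Set.add dq p.1)
       else (fv, dq)).2 := by
  obtain ⟨hkeys, hnd, hdqk, hmain⟩ := h
  rw [stepA_eq]
  by_cases hc : fv.contains p.1 = false
  · -- fresh dimension: record its first value
    have hknot : p.1 ∉ fv.keys := by
      intro hmem
      rw [PySem.Dict.contains_eq_decide_mem_keys] at hc
      simp [hmem] at hc
    have hdnot : d.contains p.1 = false := by
      rw [PySem.Dict.contains_eq_decide_mem_keys, hkeys]
      simp [hknot]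
    have hdget : d.getD p.1 [] = [] :=
      PySem.Dict.getD_of_not_contains _ _ hdnot
    have hdqnot : p.1 ∉ dq := fun hm => hknot (hdqk _ hm)
    simp only [hc, if_true]
    refine ⟨?_, ?_, ?_, ?_⟩
    · rw [PySem.Dict.keys_insert_of_not_contains _ _ hdnot,
        PySem.Dict.keys_insert_of_not_contains _ _ hc, hkeys]
    · rw [PySem.Dict.keys_insert_of_not_contains _ _ hc]
      simp only [List.nodup_append, List.nodup_cons, List.not_mem_nil, not_false_iff,
        List.nodup_nil, and_true, true_and]
      refine ⟨hnd, ?_⟩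
      intro a ha b hb
      simp only [List.mem_cons, List.not_mem_nil, or_false] at hb
      subst hb
      intro hab
      exact hknot (hab ▸ ha)
    · intro k hk
      rw [PySem.Dict.keys_insert_of_not_contains _ _ hc]
      exact List.mem_append_left _ (hdqk _ hk)
    · intro k v0 hkv
      rw [PySem.Dict.get?_insert] at hkv
      by_cases hkp : k = p.1
      · subst hkp
        have hpv : p.2 = v0 := by simpa using hkv
        subst hpv
        refine ⟨[p.2], ?_, ?_⟩
        · rw [PySem.Dict.get?_insert, if_pos rfl, hdget]
          rfl
        · simp [hdqnot]
      · rw [if_neg hkp] at hkv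
        obtain ⟨s, hs, hcond⟩ := hmain k v0 hkv
        exact ⟨s, by rw [PySem.Dict.get?_insert, if_neg hkp]; exact hs, hcond⟩
  · -- known dimension
    have hc' : fv.contains p.1 = true := by
      cases hb : fv.contains p.1 with
      | false => exact absurd hb hc
      | true => rfl
    have hkmem : p.1 ∈ fv.keys := by
      rw [PySem.Dict.contains_eq_decide_mem_keys] at hc'
      simpa using hc'
    obtain ⟨v0, hv0⟩ : ∃ v0, fv.get? p.1 = some v0 := by
      cases hg : fv.get? p.1 with
      | none => exact absurd ((PySem.Dict.get?_eq_none_iff_not_mem_keys fv p.1).mp hg) (not_not_intro hkmem)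
      | some w => exact ⟨w, rfl⟩
    have hgetD : fv.getD p.1 "" = v0 := PySem.Dict.getD_of_get?_eq_some _ _ hv0
    obtain ⟨s, hs, hcond⟩ := hmain p.1 v0 hv0
    have hdc : d.contains p.1 = true := by
      rw [PySem.Dict.contains_eq_decide_mem_keys, hkeys]; simpa using hkmem
    have hdgetD : d.getD p.1 [] = s := PySem.Dict.getD_of_get?_eq_some _ _ hs
    have hkeys' : (d.insert p.1 (PySem.Set.add (d.getD p.1 []) p.2)).keys = d.keys :=
      PySem.Dict.keys_insert_of_contains _ _ hdc
    -- the new dict state d' and how lookups behave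
    have hget' : ∀ k, (d.insert p.1 (PySem.Set.add (d.getD p.1 []) p.2)).get? k
        = if k = p.1 then some (PySem.Set.add s p.2) else d.get? k := by
      intro k; rw [PySem.Dict.get?_insert, hdgetD]
    have hlen : s.length ≤ (PySem.Set.add s p.2).length := by
      rw [PySem.Set.add_eq_ite]
      split <;> simp
    have hcf : (fv.contains p.1 = false) = False := by simp [hc']
    simp only [hcf, if_false]
    by_cases hne : fv.getD p.1 "" ≠ p.2
    · -- second distinct value: disqualify
      simp only [if_pos hne]
      refine ⟨by rw [hkeys', hkeys], hnd, ?_, ?_⟩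
      · intro k hk
        rcases (PySem.Set.mem_add _ _ _).mp hk with hk | hk
        · exact hdqk _ hk
        · subst hk; exact hkmem
      · intro k w hw
        by_cases hkp : k = p.1
        · subst hkp
          rw [hv0] at hw
          obtain rfl : v0 = w := by injection hw
          refine ⟨PySem.Set.add s p.2, by rw [hget', if_pos rfl], ?_⟩
          have hmemadd : p.1 ∈ PySem.Set.add dq p.1 := (PySem.Set.mem_add _ _ _).mpr (Or.inr rfl)
          simp only [hmemadd, if_true]
          by_cases hdq : p.1 ∈ dq
          · simp only [hdq, if_true] at hcond
            omega
          · simp only [hdq, if_false] at hcond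
            subst hcond
            rw [hgetD] at hne
            rw [PySem.Set.add_eq_ite]
            have hni : p.2 ∉ ([v0] : List String) := by
              simp only [List.mem_singleton]
              exact fun h => hne h.symm
            rw [if_neg hni]
            simp
        · obtain ⟨s', hs', hcond'⟩ := hmain k w hw
          refine ⟨s', by rw [hget', if_neg hkp]; exact hs', ?_⟩
          have : (k ∈ PySem.Set.add dq p.1) ↔ (k ∈ dq) := by
            rw [PySem.Set.mem_add _ _ _]
            exact ⟨fun h => h.resolve_right (fun he => hkp he), Or.inl⟩
          simp only [this]
          exact hcond'
    · -- repeated first value: nothing changes on B's side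
      simp only [if_neg hne]
      have hveq : p.2 = v0 := by
        rw [hgetD] at hne
        exact (not_not.mp hne).symm
      refine ⟨by rw [hkeys', hkeys], hnd, hdqk, ?_⟩
      intro k w hw
      by_cases hkp : k = p.1
      · subst hkp
        rw [hv0] at hw
        obtain rfl : v0 = w := by injection hw
        refine ⟨PySem.Set.add s p.2, by rw [hget', if_pos rfl], ?_⟩
        by_cases hdq : p.1 ∈ dq
        · simp only [hdq, if_true] at hcond ⊢
          omega
        · simp only [hdq, if_false] at hcond ⊢
          subst hcond
          rw [PySem.Set.add_eq_ite, hveq]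
          simp
      · obtain ⟨s', hs', hcond'⟩ := hmain k w hw
        exact ⟨s', by rw [hget', if_neg hkp]; exact hs', hcond'⟩

lemma fold_inv (l : List (String × String)) (d : PySem.Dict String (PySem.Set String))
    (fv : PySem.Dict String String) (dq : PySem.Set String) (h : InvUD d fv dq) :
    InvUD (l.foldl (fun d p => d.modify p.1 [] (fun s => PySem.Set.add s p.2)) d)
      ((l.foldl (fun st p =>
          if st.1.contains p.1 = false then (st.1.insert p.1 p.2, st.2)
          else if st.1.getD p.1 "" ≠ p.2 then (st.1, PySem.Set.add st.2 p.1)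
          else st) (fv, dq)).1)
      ((l.foldl (fun st p =>
          if st.1.contains p.1 = false then (st.1.insert p.1 p.2, st.2)
          else if st.1.getD p.1 "" ≠ p.2 then (st.1, PySem.Set.add st.2 p.1)
          else st) (fv, dq)).2) := by
  induction l generalizing d fv dq with
  | nil => exact h
  | cons p l ih =>
    simp only [List.foldl_cons]
    have h2 := ih (d.modify p.1 [] (fun s => PySem.Set.add s p.2))
      ((if fv.contains p.1 = false then (fv.insert p.1 p.2, dq)
        else if fv.getD p.1 "" ≠ p.2 then (fv, PySem.Set.add dq p.1) else (fv, dq)).1)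
      ((if fv.contains p.1 = false then (fv.insert p.1 p.2, dq)
        else if fv.getD p.1 "" ≠ p.2 then (fv, PySem.Set.add dq p.1) else (fv, dq)).2)
      (step_inv p d fv dq h)
    rw [Prod.mk.eta] at h2
    exact h2

lemma foldl_len_filter (ps : List (String × PySem.Set String)) (u : PySem.Set String)
    (hnd : (ps.map Prod.fst).Nodup) (hdisj : ∀ p ∈ ps, p.1 ∉ u) :
    ps.foldl (fun u p => if PySem.Set.len p.2 == 1 then PySem.Set.add u p.1 else u) u
      = u ++ (ps.filter (fun p => PySem.Set.len p.2 == 1)).map Prod.fst := by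
  induction ps generalizing u with
  | nil => simp
  | cons p ps ih =>
    simp only [List.map_cons, List.nodup_cons] at hnd
    obtain ⟨hp, hnd'⟩ := hnd
    by_cases hlen : PySem.Set.len p.2 == 1
    · have hadd : PySem.Set.add u p.1 = u ++ [p.1] :=
        PySem.Set.add_of_not_mem (hdisj p (List.mem_cons_self) )
      rw [List.foldl_cons, if_pos hlen, hadd,
        ih (u ++ [p.1]) hnd' ?_]
      · rw [List.filter_cons, if_pos hlen, List.map_cons, List.append_assoc,
          List.singleton_append]
      · intro q hq
        simp only [List.mem_append, List.mem_singleton]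
        rintro (hu | hqp)
        · exact hdisj q (List.mem_cons_of_mem _ hq) hu
        · exact hp (hqp ▸ List.mem_map_of_mem hq)
    · rw [List.foldl_cons, if_neg (by simpa using hlen),
        ih u hnd' (fun q hq => hdisj q (List.mem_cons_of_mem _ hq)),
        List.filter_cons, if_neg hlen]

lemma extract_eq (d : PySem.Dict String (PySem.Set String))
    (fv : PySem.Dict String String) (dq : PySem.Set String) (h : InvUD d fv dq) :
    d.items.foldl
      (fun u p => if PySem.Set.len p.2 == 1 then PySem.Set.add u p.1 else u)
      PySem.Set.empty
      = PySem.Set.diff (PySem.Set.ofList fv.keys) dq := by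
  obtain ⟨hkeys, hnd, _, hmain⟩ := h
  have hdnd : d.keys.Nodup := hkeys ▸ hnd
  have hknd : (d.items.map Prod.fst).Nodup := hdnd
  rw [foldl_len_filter d.items PySem.Set.empty hknd (by intro p _ hp; simp [PySem.Set.empty] at hp)]
  rw [PySem.Dict.items_eq_map_keys d hdnd []]
  rw [List.filter_map, List.map_map]
  rw [PySem.Set.ofList_eq_self_of_nodup fv.keys hnd]
  show (List.filter _ d.keys).map _ = _
  rw [hkeys]
  unfold PySem.Set.diff
  rw [List.map_id'']
  · apply List.filter_congr
    intro k hk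
    obtain ⟨v0, hv0⟩ : ∃ v0, fv.get? k = some v0 := by
      cases hg : fv.get? k with
      | none => exact absurd ((PySem.Dict.get?_eq_none_iff_not_mem_keys fv k).mp hg) (not_not_intro hk)
      | some w => exact ⟨w, rfl⟩
    obtain ⟨s, hs, hcond⟩ := hmain k v0 hv0
    have hgd : d.getD k [] = s := PySem.Dict.getD_of_get?_eq_some _ _ hs
    simp only [Function.comp, hgd]
    by_cases hdq : k ∈ dq
    · simp only [hdq, if_true] at hcond
      simp only [PySem.Set.contains_eq_listContains]
      simp [PySem.Set.len, hdq]
      omega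
    · simp only [hdq, if_false] at hcond
      subst hcond
      simp only [PySem.Set.contains_eq_listContains]
      simp [PySem.Set.len, hdq]
  · intro k; rfl

-- ===== VERDICT (by name: the statement is the Claim_ definition above) =====
theorem uninteresting_dimensions_spec : Claim_equal_uninteresting_dimensions := by
  intro data _
  unfold Spec_uninteresting_dimensions uninteresting_dimensions uninteresting_dimensions_alt
  simp only [← List.foldl_flatten]
  have hinv0 : InvUD PySem.Dict.empty PySem.Dict.empty PySem.Set.empty := by
    refine ⟨rfl, ?_, ?_, ?_⟩
    · simp [PySem.Dict.keys_empty]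
    · intro k hk; simp [PySem.Set.empty] at hk
    · intro k v0 hkv; rw [PySem.Dict.get?_empty] at hkv; exact absurd hkv (by simp)
  exact extract_eq _ _ _ (fold_inv data.flatten _ _ _ hinv0)
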